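-- pv_equiv track=rewrite | github.com/AndrewLitteken/csv-markdown-conversion | csv-to-markdown.py | format_item
-- ===== SOURCE A (Python) =====
-- def format_item(formats, item, col, row):
-- 	if (col, row) in formats:
-- 		style = formats[(col, row)]
-- 		for style_type in style:
-- 			if style_type == 'bold':
-- 				item = '**' + item + '**'
-- 			if style_type == 'italics':
-- 				item = '_' + item + '_'
-- 			if style_type == 'code':
-- 				item = '`' + item + '`'
-- 	return item
-- ===== SOURCE B (Python) =====
-- _MARKERS = {'bold': '**', 'italics': '_', 'code': '`'}
--
-- def format_item(formats, item, col, row):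
-- 	prefix = ''
-- 	suffix = ''
-- 	for style_type in formats.get((col, row), ()):
-- 		marker = _MARKERS.get(style_type)
-- 		if marker is not None:
-- 			prefix = marker + prefix
-- 			suffix = suffix + marker
-- 	return prefix + item + suffix
-- ===== Notes on version B (the rewrite author's own statement) =====
-- stated objective: alternative
-- what changed: Instead of repeatedly rewrapping the item (three equality tests per style), B folds the styles once into two accumulators prefix/suffix via a marker table and does a single concatenation prefix + item + suffix at the end.
import Mathlib
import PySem

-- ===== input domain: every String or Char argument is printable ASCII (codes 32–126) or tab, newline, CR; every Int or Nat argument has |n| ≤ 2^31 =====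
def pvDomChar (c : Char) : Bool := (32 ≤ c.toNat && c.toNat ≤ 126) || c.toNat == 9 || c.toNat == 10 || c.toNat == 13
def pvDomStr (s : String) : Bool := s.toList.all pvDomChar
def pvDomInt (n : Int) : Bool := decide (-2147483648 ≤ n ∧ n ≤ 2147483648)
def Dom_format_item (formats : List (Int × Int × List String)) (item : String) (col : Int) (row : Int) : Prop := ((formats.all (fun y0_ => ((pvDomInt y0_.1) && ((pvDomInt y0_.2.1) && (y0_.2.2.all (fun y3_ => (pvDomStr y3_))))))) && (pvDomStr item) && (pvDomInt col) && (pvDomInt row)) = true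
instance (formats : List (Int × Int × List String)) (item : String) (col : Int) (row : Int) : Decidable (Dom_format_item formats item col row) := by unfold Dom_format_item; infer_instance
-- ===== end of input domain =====

-- B folds the styles once into two prefix/suffix accumulators via a marker table
-- and does a single final concatenation, instead of A's repeated rewrapping of the item.

-- ===== PORT A =====
-- dict membership/lookup on the (col,row)-keyed dict: first matching entry
def fmtLookup : List (Int × Int × List String) → Int → Int → Option (List String)
  | [], _, _ => none
  | (c, r, s) :: rest, col, row =>
      if c = col ∧ r = row then some s else fmtLookup rest col row

-- the loop body of A: the three sequential ifs rewrapping item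
def applyStyleA (item : String) (style_type : String) : String :=
  let item := if style_type = "bold" then "**" ++ item ++ "**" else item
  let item := if style_type = "italics" then "_" ++ item ++ "_" else item
  if style_type = "code" then "`" ++ item ++ "`" else item

def format_item (formats : List (Int × Int × List String)) (item : String) (col : Int) (row : Int) : String :=
  match fmtLookup formats col row with
  | some style => style.foldl applyStyleA item
  | none => item

-- ===== PORT B =====
-- the module-level _MARKERS dict of Source B
def pvMarkers : PySem.Dict String String :=
  PySem.Dict.mk [("bold", "**"), ("italics", "_"), ("code", "`")]

-- the loop body of B: extend the two accumulators when the style is known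
def stepB (acc : String × String) (style_type : String) : String × String :=
  match PySem.Dict.get? pvMarkers style_type with
  | some marker => (marker ++ acc.1, acc.2 ++ marker)
  | none => acc

def format_item_alt (formats : List (Int × Int × List String)) (item : String) (col : Int) (row : Int) : String :=
  let style := ((formats.find? (fun e => e.1 == col && e.2.1 == row)).map (·.2.2)).getD []
  let ps := style.foldl stepB ("", "")
  ps.1 ++ item ++ ps.2

-- ===== PRECONDITION & SPEC =====
def Spec_format_item (formats : List (Int × Int × List String)) (item : String) (col : Int) (row : Int) (out : String) : Prop := out = format_item_alt formats item col row
instance (formats : List (Int × Int × List String)) (item : String) (col : Int) (row : Int) (out : String) : Decidable (Spec_format_item formats item col row out) := by unfold Spec_format_item; infer_instance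

-- ===== CLAIM (what is proved, stated in full; the proofs are below) =====
def Claim_equal_format_item : Prop := ∀ (formats : List (Int × Int × List String)) (item : String) (col : Int) (row : Int), Dom_format_item formats item col row → Spec_format_item formats item col row (format_item formats item col row)

-- ===== LEMMAS AND PROOFS =====


-- lookup agreement: A's membership+lookup equals B's find?-based lookup
theorem fmtLookup_eq_find (formats : List (Int × Int × List String)) (col row : Int) :
    fmtLookup formats col row
      = (formats.find? (fun e => e.1 == col && e.2.1 == row)).map (·.2.2) := by
  induction formats with
  | nil => rfl
  | cons hd tl ih =>
      obtain ⟨c, r, s⟩ := hd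
      by_cases h : c = col ∧ r = row
      · simp [fmtLookup, List.find?, h.1, h.2]
      · have : ¬ (c == col && r == row) = true := by
          simp only [Bool.and_eq_true, beq_iff_eq]; exact h
        simp [fmtLookup, List.find?, h, this, ih]

-- A's three sequential ifs equal one marker-table lookup wrap
theorem applyStyleA_eq_marker (item st : String) :
    applyStyleA item st
      = match PySem.Dict.get? pvMarkers st with
        | some m => m ++ item ++ m
        | none => item := by
  by_cases hb : st = "bold"
  · subst hb; rfl
  · by_cases hi : st = "italics"
    · subst hi; rfl
    · by_cases hc : st = "code"
      · subst hc; rfl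
      · simp [applyStyleA, hb, hi, hc, pvMarkers,
              Ne.symm hb, Ne.symm hi, Ne.symm hc, PySem.Dict.get?]

-- the key invariant: rewrapping a framed item equals folding the two accumulators
theorem wrap_eq_fold (style : List String) :
    ∀ (pre item suf : String),
      style.foldl applyStyleA (pre ++ item ++ suf)
        = (style.foldl stepB (pre, suf)).1 ++ item ++ (style.foldl stepB (pre, suf)).2 := by
  induction style with
  | nil => intro pre item suf; rfl
  | cons st rest ih =>
      intro pre item suf
      cases h : PySem.Dict.get? pvMarkers st with
      | none => simpa [List.foldl, applyStyleA_eq_marker, stepB, h] using ih pre item suf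
      | some m =>
          have e : m ++ (pre ++ item ++ suf) ++ m = (m ++ pre) ++ item ++ (suf ++ m) := by
            simp [String.append_assoc]
          simp only [List.foldl, applyStyleA_eq_marker, stepB, h]
          rw [e]; exact ih (m ++ pre) item (suf ++ m)

-- ===== VERDICT (by name: the statement is the Claim_ definition above) =====
theorem format_item_spec : Claim_equal_format_item := by
  intro formats item col row _
  unfold Spec_format_item format_item format_item_alt
  rw [fmtLookup_eq_find]
  cases (formats.find? (fun e => e.1 == col && e.2.1 == row)).map (·.2.2) with
  | none => simp
  | some style =>
      have h := wrap_eq_fold style "" item ""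
      simpa using h
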